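-- pv_equiv track=rewrite | github.com/gaston-michel/transcribir-bateria | notation/sheet_music_generator.py | convert_to_ly_notation
-- ===== SOURCE A (Python) =====
-- from typing import List, Tuple
--
-- def convert_to_ly_notation(drum_parts: List[Tuple[str, ...]]) -> List[str]:
--     mapping = {
--         ('CR',): 'cymc',
--         ('CR', 'HH'): '<cymc hh>',
--         ('CR', 'HH', 'KD'): '<cymc hh bd>',
--         ('CR', 'HH', 'KD', 'SD'): '<cymc hh bd sn>',
--         ('CR', 'HH', 'SD'): '<cymc hh sn>',
--         ('CR', 'KD'): '<cymc bd>',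
--         ('CR', 'KD', 'SD'): '<cymc bd sn>',
--         ('CR', 'SD'): '<cymc sn>',
--         ('HH',): 'hh',
--         ('HH', 'KD'): '<hh bd>',
--         ('HH', 'KD', 'SD'): '<hh bd sn>',
--         ('HH', 'SD'): '<hh sn>',
--         ('KD',): 'bd',
--         ('KD', 'SD'): '<bd sn>',
--         ('SD',): 'sn',
--         ('None',): 'r',
--     }
--     return [mapping.get(drum, 'r') for drum in drum_parts]
-- ===== SOURCE B (Python) =====
-- def convert_to_ly_notation(drum_parts):
--     tokens = {'CR': 'cymc', 'HH': 'hh', 'KD': 'bd', 'SD': 'sn'}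
--     result = []
--     for drum in drum_parts:
--         canon = tuple(t for t in ('CR', 'HH', 'KD', 'SD') if t in drum)
--         if drum and canon == drum:
--             parts = [tokens[t] for t in drum]
--             result.append(parts[0] if len(parts) == 1 else '<' + ' '.join(parts) + '>')
--         else:
--             result.append('r')
--     return result
-- ===== Notes on version B (the rewrite author's own statement) =====
-- stated objective: simpler
-- what changed: Replaces the 16-entry full-tuple lookup table by a 4-entry per-element token map plus a canonical-order/duplicate-free subset check (canon == drum), joining tokens and wrapping in <...> only for multi-element chords; everything invalid falls through to 'r'.
import Mathlib
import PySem

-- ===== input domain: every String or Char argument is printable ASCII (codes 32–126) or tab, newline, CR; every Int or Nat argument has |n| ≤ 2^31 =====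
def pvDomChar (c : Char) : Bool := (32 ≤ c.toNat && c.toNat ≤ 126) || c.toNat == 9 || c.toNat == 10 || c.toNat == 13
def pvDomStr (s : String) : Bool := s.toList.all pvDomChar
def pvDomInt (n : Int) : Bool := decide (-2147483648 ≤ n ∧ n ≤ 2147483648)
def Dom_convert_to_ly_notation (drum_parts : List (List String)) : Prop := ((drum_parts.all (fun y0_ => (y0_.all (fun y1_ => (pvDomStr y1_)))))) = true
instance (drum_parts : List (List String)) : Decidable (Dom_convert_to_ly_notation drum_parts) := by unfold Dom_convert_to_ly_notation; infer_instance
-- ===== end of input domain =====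

-- B replaces A's 16-entry full-tuple lookup table by a 4-token map plus a canonical-order
-- validity check (objective: simpler). Equivalence of the return values is proved below.

-- ===== PORT A =====
-- A's dict literal 'mapping' (tuples are List String under the type convention)
def lyMapping : PySem.Dict (List String) String :=
  PySem.Dict.ofList [
    (["CR"], "cymc"), (["CR","HH"], "<cymc hh>"), (["CR","HH","KD"], "<cymc hh bd>"),
    (["CR","HH","KD","SD"], "<cymc hh bd sn>"), (["CR","HH","SD"], "<cymc hh sn>"),
    (["CR","KD"], "<cymc bd>"), (["CR","KD","SD"], "<cymc bd sn>"), (["CR","SD"], "<cymc sn>"),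
    (["HH"], "hh"), (["HH","KD"], "<hh bd>"), (["HH","KD","SD"], "<hh bd sn>"),
    (["HH","SD"], "<hh sn>"), (["KD"], "bd"), (["KD","SD"], "<bd sn>"), (["SD"], "sn"),
    (["None"], "r")]

-- return [mapping.get(drum, 'r') for drum in drum_parts]
def convert_to_ly_notation (drum_parts : List (List String)) : List String :=
  drum_parts.map (fun drum => lyMapping.getD drum "r")

-- ===== PORT B =====
-- tokens[t]; t is always one of the four keys where B uses it, so getD with default is exact there
def lyTok (t : String) : String :=
  (PySem.Dict.ofList [("CR","cymc"),("HH","hh"),("KD","bd"),("SD","sn")]).getD t ""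

-- one iteration of B's loop body: canon check, then translate-and-join, else 'r'
def lyElem (drum : List String) : String :=
  let canon := ["CR","HH","KD","SD"].filter (fun t => drum.contains t)
  if drum ≠ [] ∧ canon = drum then
    let parts := drum.map lyTok
    if parts.length = 1 then parts.headD "" else "<" ++ PySem.Str.join " " parts ++ ">"
  else "r"

def convert_to_ly_notation_alt (drum_parts : List (List String)) : List String :=
  drum_parts.foldl (fun result drum => result ++ [lyElem drum]) []

-- ===== PRECONDITION & SPEC =====
def Spec_convert_to_ly_notation (drum_parts : List (List String)) (out : List String) : Prop := out = convert_to_ly_notation_alt drum_parts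
instance (drum_parts : List (List String)) (out : List String) : Decidable (Spec_convert_to_ly_notation drum_parts out) := by unfold Spec_convert_to_ly_notation; infer_instance

-- ===== CLAIM (what is proved, stated in full; the proofs are below) =====
def Claim_equal_convert_to_ly_notation : Prop := ∀ (drum_parts : List (List String)), Dom_convert_to_ly_notation drum_parts → Spec_convert_to_ly_notation drum_parts (convert_to_ly_notation drum_parts)

-- ===== LEMMAS AND PROOFS =====

theorem lyMapping_keys : lyMapping.keys = [["CR"],["CR","HH"],["CR","HH","KD"],
    ["CR","HH","KD","SD"],["CR","HH","SD"],["CR","KD"],["CR","KD","SD"],["CR","SD"],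
    ["HH"],["HH","KD"],["HH","KD","SD"],["HH","SD"],["KD"],["KD","SD"],["SD"],["None"]] := by
  decide

-- the per-element agreement when drum passes B's canonical-subset check
theorem lyElem_eq_of_canon (drum : List String)
    (h : ["CR","HH","KD","SD"].filter (fun t => drum.contains t) = drum) :
    lyMapping.getD drum "r" = lyElem drum := by
  by_cases h1 : drum.contains "CR" <;> by_cases h2 : drum.contains "HH" <;>
    by_cases h3 : drum.contains "KD" <;> by_cases h4 : drum.contains "SD" <;>
    · simp only [List.filter, h1, h2, h3, h4] at h
      subst h
      decide

-- the per-element agreement when drum fails B's check: both sides are 'r'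
theorem lyElem_eq_of_not_canon (drum : List String)
    (h : ¬ ["CR","HH","KD","SD"].filter (fun t => drum.contains t) = drum) :
    lyMapping.getD drum "r" = lyElem drum := by
  have hB : lyElem drum = "r" := by
    unfold lyElem
    rw [if_neg]
    intro hc
    exact h hc.2
  rw [hB]
  by_cases hm : drum ∈ lyMapping.keys
  · rw [lyMapping_keys] at hm
    simp only [List.mem_cons, List.not_mem_nil, or_false] at hm
    rcases hm with hm|hm|hm|hm|hm|hm|hm|hm|hm|hm|hm|hm|hm|hm|hm|hm <;>
      subst hm <;> first
        | decide
        | exact absurd (by decide) h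
  · rw [PySem.Dict.getD_eq_get?_getD, (PySem.Dict.get?_eq_none_iff_not_mem_keys _ _).mpr hm]
    rfl

theorem lyElem_eq (drum : List String) : lyMapping.getD drum "r" = lyElem drum := by
  by_cases h : ["CR","HH","KD","SD"].filter (fun t => drum.contains t) = drum
  · exact lyElem_eq_of_canon drum h
  · exact lyElem_eq_of_not_canon drum h

-- ===== VERDICT (by name: the statement is the Claim_ definition above) =====
theorem convert_to_ly_notation_spec : Claim_equal_convert_to_ly_notation := by
  intro drum_parts _
  unfold Spec_convert_to_ly_notation convert_to_ly_notation convert_to_ly_notation_alt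
  rw [PySem.List.foldl_append_singleton_eq_map]
  exact List.map_congr_left (fun drum _ => lyElem_eq drum)
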